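-- pv_equiv track=rewrite | github.com/hunkim98/coding_test | tiktok/collectibles.py | divideCardPackets
-- ===== SOURCE A (Python) =====
-- def primeNumbersTill(n):
--     primes = [True] * (n + 1)
--     p = 2
--     while p * p <= n:
--         if primes[p]:
--             for i in range(p * p, n + 1, p):
--                 primes[i] = False
--         p += 1
--     return [idx for idx in range(2, n + 1) if primes[idx] == True]
--
-- def divideCardPackets(inputs):
--     primes = primeNumbersTill(500)
--     minSum = float("inf")
--     for p in primes:
--         sum = 0
--         for val in inputs[1:]:
--             sum += val % p
--         if sum < minSum:
--             minSum = sum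
--
--     return minSum
-- ===== SOURCE B (Python) =====
-- def divideCardPackets(inputs):
--     primes = []
--     for n in range(2, 501):
--         if all(n % p for p in primes if p * p <= n):
--             primes.append(n)
--     return min(sum(val % p for val in inputs[1:]) for p in primes)
-- ===== Notes on version B (the rewrite author's own statement) =====
-- stated objective: idiomatic
-- what changed: Replaced the Sieve-of-Eratosthenes prime generator with trial division against already-found primes up to sqrt(n), and the explicit running-minimum loop with min() over a generator of the remainder sums.
import Mathlib
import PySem

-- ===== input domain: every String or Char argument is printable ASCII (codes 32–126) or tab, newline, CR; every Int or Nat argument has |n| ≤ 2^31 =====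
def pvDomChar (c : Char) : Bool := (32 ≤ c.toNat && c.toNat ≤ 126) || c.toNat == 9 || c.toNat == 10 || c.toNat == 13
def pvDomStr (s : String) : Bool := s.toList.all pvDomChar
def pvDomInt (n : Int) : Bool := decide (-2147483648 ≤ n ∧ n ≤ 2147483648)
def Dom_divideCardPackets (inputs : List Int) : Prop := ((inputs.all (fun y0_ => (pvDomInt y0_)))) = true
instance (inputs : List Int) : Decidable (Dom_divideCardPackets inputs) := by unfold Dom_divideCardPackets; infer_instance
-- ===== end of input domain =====

-- B replaces A's Sieve-of-Eratosthenes prime generator with trial division and the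
-- explicit running-minimum loop with min() over a generator (idiomatic, same cost).

-- ===== PORT A =====
-- inner 'for i in range(p*p, n+1, p): primes[i] = False' (i is always a valid index here)
def pvSieveMark (n p : Int) (primes : List Bool) : List Bool :=
  (PySem.List.pyRange (p * p) (n + 1) p).foldl (fun br i => br.set i.toNat false) primes

-- 'while p * p <= n: ... p += 1'; fuel bounds the loop (p only increases), exact for fuel ≥ iterations
def pvSieveLoop (n : Int) (p : Int) (primes : List Bool) (fuel : Nat) : List Bool :=
  match fuel with
  | 0 => primes
  | fuel + 1 =>
    if p * p ≤ n then
      let primes' := if primes.getD p.toNat false then pvSieveMark n p primes else primes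
      pvSieveLoop n (p + 1) primes' fuel
    else primes

def primeNumbersTill (n : Int) : List Int :=
  let primes := pvSieveLoop n 2 (List.replicate (n + 1).toNat true) (n + 2).toNat
  (PySem.List.pyRange 2 (n + 1) 1).filter (fun idx => primes.getD idx.toNat false == true)

def divideCardPackets (inputs : List Int) : Int :=
  let primes := primeNumbersTill 500
  -- minSum = float("inf") modelled as none; primes is nonempty, so the loop always yields some
  let minSum : Option Int := primes.foldl (fun acc p =>
      let s := (PySem.List.slice inputs (some 1) none).foldl (fun s v => s + PySem.Int.mod v p) 0
      match acc with
      | none => some s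
      | some m => if s < m then some s else some m) none
  minSum.getD 0

-- ===== PORT B =====
-- 'all(n % p for p in primes if p * p <= n)'
def pvTrialOk (primes : List Int) (n : Int) : Bool :=
  (primes.filter (fun p => decide (p * p ≤ n))).all (fun p => decide (PySem.Int.mod n p ≠ 0))

def divideCardPackets_alt (inputs : List Int) : Int :=
  let primes := (PySem.List.pyRange 2 501 1).foldl
      (fun primes n => if pvTrialOk primes n then primes ++ [n] else primes) []
  -- min() of the generated sums; the list is nonempty (primes is), so min? is some
  ((PySem.List.min?
      (primes.map fun p =>
        (PySem.List.slice inputs (some 1) none).foldl (fun s v => s + PySem.Int.mod v p) 0)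
      (fun x => x)).getD 0)

-- ===== PRECONDITION & SPEC =====
def Spec_divideCardPackets (inputs : List Int) (out : Int) : Prop := out = divideCardPackets_alt inputs
instance (inputs : List Int) (out : Int) : Decidable (Spec_divideCardPackets inputs out) := by unfold Spec_divideCardPackets; infer_instance

-- ===== CLAIM (what is proved, stated in full; the proofs are below) =====
def Claim_equal_divideCardPackets : Prop := ∀ (inputs : List Int), Dom_divideCardPackets inputs → Spec_divideCardPackets inputs (divideCardPackets inputs)

-- ===== LEMMAS AND PROOFS =====

-- the two prime generators produce the same list
set_option maxRecDepth 100000 in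
set_option maxHeartbeats 4000000 in
theorem primes_eq :
    primeNumbersTill 500 =
      (PySem.List.pyRange 2 501 1).foldl
        (fun primes n => if pvTrialOk primes n then primes ++ [n] else primes) [] := by
  decide

-- A's running-minimum fold, once started, computes foldl min over the mapped sums
theorem foldA_some (f : Int → Int) (ps : List Int) (m : Int) :
    ps.foldl (fun acc p =>
      let s := f p
      match acc with
      | none => some s
      | some m => if s < m then some s else some m) (some m)
    = some ((ps.map f).foldl min m) := by
  induction ps generalizing m with
  | nil => rfl
  | cons p t ih =>
    simp only [List.foldl_cons, List.map_cons]
    show List.foldl _ (if f p < m then some (f p) else some m) t = _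
    by_cases h : f p < m
    · rw [if_pos h, ih]
      congr 1
      have : min m (f p) = f p := by omega
      rw [this]
    · rw [if_neg h, ih]
      congr 1
      have : min m (f p) = m := by omega
      rw [this]

theorem foldA_eq_min (f : Int → Int) (x : Int) (t : List Int) :
    ((x :: t).foldl (fun acc p =>
      let s := f p
      match acc with
      | none => some s
      | some m => if s < m then some s else some m) none).getD 0
    = (PySem.List.min? ((x :: t).map f) (fun y => y)).getD 0 := by
  rw [List.map_cons, PySem.List.min?_id_cons, List.foldl_cons]
  show (List.foldl _ (some (f x)) t).getD 0 = _
  rw [foldA_some, List.foldl_map]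

-- the generated prime list is nonempty
set_option maxRecDepth 100000 in
set_option maxHeartbeats 4000000 in
theorem primes_ne_nil :
    (PySem.List.pyRange 2 501 1).foldl
      (fun primes n => if pvTrialOk primes n then primes ++ [n] else primes) [] ≠ [] := by
  decide

-- ===== VERDICT (by name: the statement is the Claim_ definition above) =====
theorem divideCardPackets_spec : Claim_equal_divideCardPackets := by
  intro inputs _
  show divideCardPackets inputs = divideCardPackets_alt inputs
  unfold divideCardPackets divideCardPackets_alt
  rw [primes_eq]
  cases h : (PySem.List.pyRange 2 501 1).foldl
      (fun primes n => if pvTrialOk primes n then primes ++ [n] else primes) [] with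
  | nil => exact absurd h primes_ne_nil
  | cons x t =>
    exact foldA_eq_min
      (fun p => (PySem.List.slice inputs (some 1) none).foldl (fun s v => s + PySem.Int.mod v p) 0) x t
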